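-- pv_equiv track=rewrite | github.com/sppunderreview/PSSO | CGC/Prototype.py | computesComEdges
-- ===== SOURCE A (Python) =====
-- def computesComEdges(comVertex, succS, succT):
--     comVertexD = {}
--     for (u,v) in comVertex:
--         comVertexD[str((u,v))] = True
--     comE = 0
--
--     for u in succS:
--         for v in succS[u]:
--             isIn = False
--             for uT in succT:
--                 if isIn:
--                     break
--                 for vT in succT[uT]:
--                     if (str((u, uT)) in comVertexD) and (str((v, vT)) in comVertexD):
--                         isIn = True
--                         break
--             if isIn:
--                 comE += 1
--     return comE
-- ===== SOURCE B (Python) =====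
-- def computesComEdges(comVertex, succS, succT):
--     # one pass over comVertex builds the match-sets; per S-edge only matched
--     # target sources are scanned instead of every T-edge
--     match = {}
--     for (u, v) in comVertex:
--         match.setdefault(u, set()).add(v)
--     comE = 0
--     for u, vs in succS.items():
--         mu = match.get(u, ())
--         for v in vs:
--             mv = match.get(v, ())
--             if any(uT in succT and any(w in mv for w in succT[uT]) for uT in mu):
--                 comE += 1
--     return comE
-- ===== Notes on version B (the rewrite author's own statement) =====
-- stated objective: faster
-- what changed: Instead of testing every S-edge against every T-edge with string-keyed membership, B builds per-vertex match sets from comVertex in one pass and, per S-edge (u,v), scans only the target vertices matched to u and intersects their successor lists with the match set of v.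
import Mathlib
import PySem

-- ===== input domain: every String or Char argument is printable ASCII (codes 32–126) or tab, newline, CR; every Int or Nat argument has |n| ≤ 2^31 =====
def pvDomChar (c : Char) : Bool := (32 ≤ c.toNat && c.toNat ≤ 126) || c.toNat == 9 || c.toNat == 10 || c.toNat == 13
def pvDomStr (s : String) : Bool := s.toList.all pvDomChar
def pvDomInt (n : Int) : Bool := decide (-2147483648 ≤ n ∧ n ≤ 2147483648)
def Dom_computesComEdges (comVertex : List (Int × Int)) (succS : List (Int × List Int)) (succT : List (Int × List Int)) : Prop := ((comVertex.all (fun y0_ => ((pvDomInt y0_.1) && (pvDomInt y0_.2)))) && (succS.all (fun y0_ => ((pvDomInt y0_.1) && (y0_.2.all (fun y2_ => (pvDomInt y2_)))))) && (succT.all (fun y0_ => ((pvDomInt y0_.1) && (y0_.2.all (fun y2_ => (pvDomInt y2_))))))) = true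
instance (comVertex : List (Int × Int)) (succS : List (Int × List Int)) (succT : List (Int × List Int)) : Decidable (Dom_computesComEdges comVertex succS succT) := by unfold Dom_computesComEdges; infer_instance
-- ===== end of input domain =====

-- B replaces A's all-S-edges x all-T-edges scan (with string-keyed membership) by per-vertex
-- match sets built once from comVertex, scanning per S-edge only the matched target vertices.


-- ===== PORT A =====
-- str((u, v)) : the Python key "(<u>, <v>)" as a character list
def pvKey (u v : Int) : List Char :=
  '(' :: (PySem.Int.toChars u ++ (',' :: (' ' :: (PySem.Int.toChars v ++ [')']))))

-- inner 'for vT in succT[uT]' loop with its break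
def cceRow (cd : PySem.Dict (List Char) Bool) (u v uT : Int) : List Int → Bool
  | [] => false
  | vT :: rest =>
    if cd.contains (pvKey u uT) && cd.contains (pvKey v vT) then true
    else cceRow cd u v uT rest

-- 'for uT in succT' loop with its 'if isIn: break'
def cceScan (cd : PySem.Dict (List Char) Bool) (u v : Int) : List (Int × List Int) → Bool
  | [] => false
  | (uT, vTs) :: rest =>
    if cceRow cd u v uT vTs then true else cceScan cd u v rest

def computesComEdges (comVertex : List (Int × Int)) (succS : List (Int × List Int)) (succT : List (Int × List Int)) : Int :=
  let cd := comVertex.foldl (fun d p => d.insert (pvKey p.1 p.2) true) PySem.Dict.empty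
  let sD := PySem.Dict.ofList succS
  let tD := PySem.Dict.ofList succT
  sD.items.foldl (fun comE p =>
    p.2.foldl (fun comE v => if cceScan cd p.1 v tD.items then comE + 1 else comE) comE) 0

-- ===== PORT B =====
def computesComEdges_alt (comVertex : List (Int × Int)) (succS : List (Int × List Int)) (succT : List (Int × List Int)) : Int :=
  let m := comVertex.foldl (fun d p => d.insert p.1 (PySem.Set.add (d.getD p.1 []) p.2)) PySem.Dict.empty
  let tD := PySem.Dict.ofList succT
  (PySem.Dict.ofList succS).items.foldl (fun comE p =>
    let mu := m.getD p.1 []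
    p.2.foldl (fun comE v =>
      let mv := m.getD v []
      if mu.any (fun uT => match tD.get? uT with
          | some ws => ws.any (fun w => PySem.Set.contains mv w)
          | none => false) then comE + 1 else comE) comE) 0

-- ===== PRECONDITION & SPEC =====
def Spec_computesComEdges (comVertex : List (Int × Int)) (succS : List (Int × List Int)) (succT : List (Int × List Int)) (out : Int) : Prop := out = computesComEdges_alt comVertex succS succT
instance (comVertex : List (Int × Int)) (succS : List (Int × List Int)) (succT : List (Int × List Int)) (out : Int) : Decidable (Spec_computesComEdges comVertex succS succT out) := by unfold Spec_computesComEdges; infer_instance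

-- ===== CLAIM (what is proved, stated in full; the proofs are below) =====
def Claim_equal_computesComEdges : Prop := ∀ (comVertex : List (Int × Int)) (succS : List (Int × List Int)) (succT : List (Int × List Int)), Dom_computesComEdges comVertex succS succT → Spec_computesComEdges comVertex succS succT (computesComEdges comVertex succS succT)

-- ===== LEMMAS AND PROOFS =====

-- decimal decoding of a digit list
def pvDecVal (l : List Char) : Nat := l.foldl (fun a c => 10 * a + (c.toNat - 48)) 0

theorem pvDigitChar_toNat {k : Nat} (h : k < 10) : (Nat.digitChar k).toNat = 48 + k := by
  interval_cases k <;> decide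

theorem pvDecVal_toDigits (n : Nat) :
    (Nat.toDigits 10 n).foldl (fun a c => 10 * a + (c.toNat - 48)) 0 = n := by
  induction n using Nat.strong_induction_on with
  | _ n ih =>
    by_cases h : n < 10
    · rw [Nat.toDigits_of_lt_base h]
      simp [List.foldl, pvDigitChar_toNat h]
    · rw [Nat.toDigits_of_base_le (by omega) (by omega)]
      rw [List.foldl_append]
      rw [ih (n / 10) (by omega)]
      simp [List.foldl, pvDigitChar_toNat (Nat.mod_lt n (by omega))]
      omega

theorem pvToDigits_mem_digit {n : Nat} {c : Char} (h : c ∈ Nat.toDigits 10 n) :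
    48 ≤ c.toNat ∧ c.toNat ≤ 57 := by
  induction n using Nat.strong_induction_on with
  | _ n ih =>
    by_cases hlt : n < 10
    · rw [Nat.toDigits_of_lt_base hlt] at h
      simp at h
      subst h
      rw [pvDigitChar_toNat hlt]; omega
    · rw [Nat.toDigits_of_base_le (by omega) (by omega)] at h
      rcases List.mem_append.mp h with h' | h'
      · exact ih (n / 10) (by omega) h'
      · simp at h'
        subst h'
        rw [pvDigitChar_toNat (Nat.mod_lt n (by omega))]
        omega

theorem pvToDigits_inj {a b : Nat} (h : Nat.toDigits 10 a = Nat.toDigits 10 b) : a = b := by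
  have := congrArg (fun l => l.foldl (fun a c => 10 * a + (c.toNat - 48)) 0) h
  simpa [pvDecVal_toDigits] using this

theorem pvToChars_inj {a b : Int} (h : PySem.Int.toChars a = PySem.Int.toChars b) : a = b := by
  unfold PySem.Int.toChars at h
  split_ifs at h with h1 h2 h2
  · have h' : Nat.toDigits 10 a.natAbs = Nat.toDigits 10 b.natAbs := by simpa using h
    have := pvToDigits_inj h'
    omega
  · have : '-' ∈ Nat.toDigits 10 b.toNat := h ▸ List.mem_cons_self
    have := pvToDigits_mem_digit this
    simp [Char.toNat] at this
  · have : '-' ∈ Nat.toDigits 10 a.toNat := h.symm ▸ List.mem_cons_self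
    have := pvToDigits_mem_digit this
    simp [Char.toNat] at this
  · have := pvToDigits_inj h
    omega

theorem pvToChars_no_comma {a : Int} {c : Char} (h : c ∈ PySem.Int.toChars a) : c ≠ ',' := by
  unfold PySem.Int.toChars at h
  intro hc; subst hc
  split_ifs at h
  · rcases List.mem_cons.mp h with h' | h'
    · exact absurd h' (by decide)
    · have := pvToDigits_mem_digit h'
      simp [Char.toNat] at this
  · have := pvToDigits_mem_digit h
    simp [Char.toNat] at this

theorem pvSep_inj : ∀ (X1 X2 Y1 Y2 : List Char), (∀ c ∈ X1, c ≠ ',') → (∀ c ∈ X2, c ≠ ',') →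
    X1 ++ ',' :: Y1 = X2 ++ ',' :: Y2 → X1 = X2 ∧ Y1 = Y2 := by
  intro X1
  induction X1 with
  | nil =>
    intro X2 Y1 Y2 _ h2 h
    cases X2 with
    | nil => simpa using h
    | cons x xs =>
      simp at h
      exact absurd h.1.symm (h2 x (by simp))
  | cons x xs ih =>
    intro X2 Y1 Y2 h1 h2 h
    cases X2 with
    | nil =>
      simp at h
      exact absurd h.1 (h1 x (by simp))
    | cons y ys =>
      simp at h
      obtain ⟨hxy, hrest⟩ := h
      obtain ⟨hx, hy⟩ := ih ys Y1 Y2 (fun c hc => h1 c (by simp [hc])) (fun c hc => h2 c (by simp [hc])) hrest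
      exact ⟨by simp [hxy, hx], hy⟩

theorem pvKey_inj {a b c d : Int} (h : pvKey a b = pvKey c d) : a = c ∧ b = d := by
  unfold pvKey at h
  have h' : PySem.Int.toChars a ++ ',' :: (' ' :: (PySem.Int.toChars b ++ [')'])) =
      PySem.Int.toChars c ++ ',' :: (' ' :: (PySem.Int.toChars d ++ [')'])) := by simpa using h
  obtain ⟨h1, h2⟩ := pvSep_inj _ _ _ _ (fun c hc => pvToChars_no_comma hc) (fun c hc => pvToChars_no_comma hc) h'
  have h2' : PySem.Int.toChars b ++ [')'] = PySem.Int.toChars d ++ [')'] := by simpa using h2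
  exact ⟨pvToChars_inj h1, pvToChars_inj (List.append_cancel_right h2')⟩

-- A's string-keyed dict membership is membership in comVertex
theorem pvCd_contains (comVertex : List (Int × Int)) (a b : Int) :
    (comVertex.foldl (fun d p => d.insert (pvKey p.1 p.2) true) PySem.Dict.empty).contains (pvKey a b) = true
    ↔ (a, b) ∈ comVertex := by
  rw [PySem.Dict.contains_iff_mem_keys]
  rw [PySem.Dict.keys_foldl_insert_key comVertex (fun p => pvKey p.1 p.2) (fun _ _ => true)]
  rw [PySem.Dict.keys_empty, PySem.Set.update_nil_left, PySem.Set.mem_ofList]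
  constructor
  · intro h
    obtain ⟨⟨p1, p2⟩, hp, he⟩ := List.mem_map.mp h
    obtain ⟨h1, h2⟩ := pvKey_inj he
    rwa [← h1, ← h2]
  · intro h
    exact List.mem_map.mpr ⟨(a, b), h, rfl⟩

-- B's match-set membership is membership in comVertex
theorem pvM_getD_aux (l : List (Int × Int)) (d : PySem.Dict Int (List Int)) (x w : Int) :
    w ∈ (l.foldl (fun d p => d.insert p.1 (PySem.Set.add (d.getD p.1 []) p.2)) d).getD x []
    ↔ w ∈ d.getD x [] ∨ (x, w) ∈ l := by
  induction l generalizing d with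
  | nil => simp
  | cons p rest ih =>
    obtain ⟨p1, p2⟩ := p
    rw [List.foldl_cons, ih]
    rw [PySem.Dict.getD_insert]
    by_cases hx : x = p1
    · subst hx
      simp [PySem.Set.mem_add]
      tauto
    · simp [hx]

theorem pvM_getD (comVertex : List (Int × Int)) (x w : Int) :
    w ∈ (comVertex.foldl (fun d p => d.insert p.1 (PySem.Set.add (d.getD p.1 []) p.2)) PySem.Dict.empty).getD x []
    ↔ (x, w) ∈ comVertex := by
  rw [pvM_getD_aux]
  simp [PySem.Dict.getD_empty]

-- A's inner break loops are existentials
theorem pvRow_iff (cd : PySem.Dict (List Char) Bool) (u v uT : Int) (ws : List Int) :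
    cceRow cd u v uT ws = true ↔
    ∃ w ∈ ws, cd.contains (pvKey u uT) = true ∧ cd.contains (pvKey v w) = true := by
  induction ws with
  | nil => simp [cceRow]
  | cons w rest ih =>
    rw [cceRow]
    split_ifs with h
    · simp only [Bool.and_eq_true] at h
      exact iff_of_true rfl ⟨w, List.mem_cons_self, h.1, h.2⟩
    · rw [ih]
      simp only [Bool.and_eq_true, not_and] at h
      constructor
      · rintro ⟨w', hw', hc⟩; exact ⟨w', List.mem_cons_of_mem _ hw', hc⟩
      · rintro ⟨w', hw', hc⟩
        rcases List.mem_cons.mp hw' with rfl | hw''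
        · exact absurd (h hc.1) (by simp [hc.2])
        · exact ⟨w', hw'', hc⟩

theorem pvScan_iff (cd : PySem.Dict (List Char) Bool) (u v : Int) (l : List (Int × List Int)) :
    cceScan cd u v l = true ↔
    ∃ p ∈ l, cceRow cd u v p.1 p.2 = true := by
  induction l with
  | nil => simp [cceScan]
  | cons p rest ih =>
    obtain ⟨uT, vTs⟩ := p
    rw [cceScan]
    split_ifs with h
    · exact iff_of_true rfl ⟨(uT, vTs), List.mem_cons_self, h⟩
    · rw [ih]
      constructor
      · rintro ⟨q, hq, hr⟩; exact ⟨q, List.mem_cons_of_mem _ hq, hr⟩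
      · rintro ⟨q, hq, hr⟩
        rcases List.mem_cons.mp hq with rfl | hq'
        · exact absurd hr h
        · exact ⟨q, hq', hr⟩

-- the crux: A's scan over all T-edges equals B's scan over matched target sources
theorem pvCond_eq (comVertex : List (Int × Int)) (succT : List (Int × List Int)) (u v : Int) :
    cceScan (comVertex.foldl (fun d p => d.insert (pvKey p.1 p.2) true) PySem.Dict.empty) u v
      (PySem.Dict.ofList succT).items =
    ((comVertex.foldl (fun d p => d.insert p.1 (PySem.Set.add (d.getD p.1 []) p.2)) PySem.Dict.empty).getD u []).any
      (fun uT => match (PySem.Dict.ofList succT).get? uT with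
        | some ws => ws.any (fun w =>
            ((comVertex.foldl (fun d p => d.insert p.1 (PySem.Set.add (d.getD p.1 []) p.2)) PySem.Dict.empty).getD v []).contains w)
        | none => false) := by
  rw [Bool.eq_iff_iff]
  rw [pvScan_iff, List.any_eq_true]
  constructor
  · rintro ⟨⟨uT, ws⟩, hp, hr⟩
    obtain ⟨w, hw, hcu, hcv⟩ := (pvRow_iff _ _ _ _ _).mp hr
    refine ⟨uT, (pvM_getD _ _ _).mpr ((pvCd_contains _ _ _).mp hcu), ?_⟩
    rw [(PySem.Dict.get?_eq_some_iff_mem_items _ _ _ (PySem.Dict.nodup_keys_ofList succT)).mpr hp]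
    rw [List.any_eq_true]
    refine ⟨w, hw, ?_⟩
    have := (pvM_getD comVertex v w).mpr ((pvCd_contains _ _ _).mp hcv)
    simpa using this
  · rintro ⟨uT, hu, hm⟩
    rcases hws : (PySem.Dict.ofList succT).get? uT with _ | ws
    · rw [hws] at hm; exact absurd hm (by simp)
    · rw [hws] at hm
      simp only [List.any_eq_true] at hm
      obtain ⟨w, hw, hc⟩ := hm
      refine ⟨(uT, ws), (PySem.Dict.get?_eq_some_iff_mem_items _ _ _ (PySem.Dict.nodup_keys_ofList succT)).mp hws, ?_⟩
      rw [pvRow_iff]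
      refine ⟨w, hw, ?_, ?_⟩
      · exact (pvCd_contains _ _ _).mpr ((pvM_getD _ _ _).mp hu)
      · simp only [List.contains_eq_mem, decide_eq_true_eq] at hc
        exact (pvCd_contains _ _ _).mpr ((pvM_getD _ _ _).mp hc)

-- ===== VERDICT (by name: the statement is the Claim_ definition above) =====
theorem computesComEdges_spec : Claim_equal_computesComEdges := by
  intro comVertex succS succT _
  unfold Spec_computesComEdges computesComEdges computesComEdges_alt
  simp only []
  congr 1
  funext comE p
  congr 1
  funext comE v
  rw [pvCond_eq]
  simp only [PySem.Set.contains_eq_listContains]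
  rfl
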